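-- pv_equiv track=rewrite | github.com/g1mliii/image-match | backend/validation_utils.py | validate_categories_list
-- ===== SOURCE A (Python) =====
-- def validate_categories_list(categories):
--     """Validate list of categories for bulk operations
--
--     Args:
--         categories: List of category strings
--
--     Returns:
--         Tuple of (validated_categories, error_message)
--     """
--     if not isinstance(categories, list):
--         return None, f'categories must be an array, got {type(categories).__name__}'
--
--     if len(categories) == 0:
--         return None, 'categories array is empty'
--
--     validated = []
--     for cat in categories:
--         if cat is None or cat == '':
--             validated.append(None)  # NULL category
--         elif isinstance(cat, str):
--             validated.append(cat.strip())
--         else: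
--             return None, f'invalid category value: {cat}'
--
--     return validated, None
-- ===== SOURCE B (Python) =====
-- _SENTINEL = object()
--
-- def validate_categories_list(categories):
--     if not isinstance(categories, list):
--         return None, f'categories must be an array, got {type(categories).__name__}'
--     if len(categories) == 0:
--         return None, 'categories array is empty'
--     # validation pass: first element that is neither None, '' nor a str
--     bad = next((c for c in categories if c is not None and c != '' and not isinstance(c, str)), _SENTINEL)
--     if bad is not _SENTINEL:
--         return None, f'invalid category value: {bad}'
--     # transform pass
--     return [None if (c is None or c == '') else c.strip() for c in categories], None
-- ===== Notes on version B (the rewrite author's own statement) =====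
-- stated objective: simpler
-- what changed: A's single interleaved loop with an accumulator and mid-loop early return is split into a validate pass (next() over a generator) followed by a pure list-comprehension transform pass.
import Mathlib
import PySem

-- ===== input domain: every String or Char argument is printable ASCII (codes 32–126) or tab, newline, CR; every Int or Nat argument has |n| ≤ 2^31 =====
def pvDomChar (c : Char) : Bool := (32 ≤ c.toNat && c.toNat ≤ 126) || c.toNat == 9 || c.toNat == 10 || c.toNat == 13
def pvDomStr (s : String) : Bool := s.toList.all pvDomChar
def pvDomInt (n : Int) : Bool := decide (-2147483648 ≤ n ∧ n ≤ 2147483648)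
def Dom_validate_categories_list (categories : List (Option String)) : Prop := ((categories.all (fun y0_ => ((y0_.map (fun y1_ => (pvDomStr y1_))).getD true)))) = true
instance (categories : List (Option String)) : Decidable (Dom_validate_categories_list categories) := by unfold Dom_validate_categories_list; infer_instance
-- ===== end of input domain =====

-- ===== PORT A =====
-- B splits A's single interleaved loop into a validate pass then a transform pass. Under the
-- type convention every element is None or a str, so A's 'invalid category value' branch
-- (non-str element) is unreachable and does not appear in the port.
def vclLoopA : List (Option String) → List (Option String) → Option (List (Option String)) × Option String
  | [], validated => (some validated, none)
  | cat :: rest, validated =>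
    match cat with
    | none => vclLoopA rest (validated ++ [none])
    | some s =>
      if s = "" then vclLoopA rest (validated ++ [none])
      else vclLoopA rest (validated ++ [some (PySem.Str.strip s)])

def validate_categories_list (categories : List (Option String)) : Option (List (Option String)) × Option String :=
  if categories.length = 0 then (none, some "categories array is empty")
  else vclLoopA categories []

-- ===== PORT B =====
-- Source B's validation pass looks for an element that is neither None, '' nor a str; under the
-- type convention no element can be invalid, so the predicate is constantly false and the
-- error branch is unreachable.
def vclInvalid (c : Option String) : Bool :=
  match c with
  | none => false
  | some _ => false

def vclTransform (c : Option String) : Option String :=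
  match c with
  | none => none
  | some s => if s = "" then none else some (PySem.Str.strip s)

def validate_categories_list_alt (categories : List (Option String)) : Option (List (Option String)) × Option String :=
  if categories.length = 0 then (none, some "categories array is empty")
  else
    match categories.find? vclInvalid with
    | some _ => (none, some "invalid category value")  -- unreachable for these types
    | none => (some (categories.map vclTransform), none)

-- ===== PRECONDITION & SPEC =====
def Spec_validate_categories_list (categories : List (Option String)) (out : Option (List (Option String)) × Option String) : Prop := out = validate_categories_list_alt categories
instance (categories : List (Option String)) (out : Option (List (Option String)) × Option String) : Decidable (Spec_validate_categories_list categories out) := by unfold Spec_validate_categories_list; infer_instance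

-- ===== CLAIM (what is proved, stated in full; the proofs are below) =====
def Claim_equal_validate_categories_list : Prop := ∀ (categories : List (Option String)), Dom_validate_categories_list categories → Spec_validate_categories_list categories (validate_categories_list categories)

-- ===== LEMMAS AND PROOFS =====
theorem vclFind_none (xs : List (Option String)) : xs.find? vclInvalid = none := by
  induction xs with
  | nil => rfl
  | cons c rest ih => cases c <;> simpa [List.find?, vclInvalid] using ih

theorem vclLoopA_eq (xs acc : List (Option String)) :
    vclLoopA xs acc = (some (acc ++ xs.map vclTransform), none) := by
  induction xs generalizing acc with
  | nil => simp [vclLoopA]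
  | cons c rest ih =>
    cases c with
    | none => simp [vclLoopA, vclTransform, ih]
    | some s =>
      by_cases hs : s = "" <;> simp [vclLoopA, vclTransform, hs, ih]


-- ===== VERDICT (by name: the statement is the Claim_ definition above) =====
theorem validate_categories_list_spec : Claim_equal_validate_categories_list := by
  intro categories _
  unfold Spec_validate_categories_list validate_categories_list validate_categories_list_alt
  by_cases h : categories.length = 0
  · simp [h]
  · simp [h, vclFind_none, vclLoopA_eq categories []]
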